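-- pv_equiv track=rewrite | github.com/Call-Sure-AI/csai-processor | src/services/booking_service.py | spell_out_email
-- ===== SOURCE A (Python) =====
-- def spell_out_email(email: str) -> str:
--     """Spell out email for verification"""
--
--     parts = email.lower().split('@')
--     if len(parts) != 2:
--         return email
--
--     username, domain = parts
--
--     # Spell out username
--     username_spelled = ", ".join(list(username))
--
--     # Spell out domain
--     domain_parts = domain.split('.')
--     domain_spelled = " dot ".join(
--         ", ".join(list(part)) for part in domain_parts
--     )
--
--     return f"{username_spelled}, at, {domain_spelled}"
-- ===== SOURCE B (Python) =====
-- def spell_out_email(email: str) -> str: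
--     # Single linear pass state machine instead of split + nested joins.
--     if email.count('@') != 1:
--         return email
--     res = []
--     need_sep = False
--     in_domain = False
--     for ch in email.lower():
--         if ch == '@':
--             res.append(', at, ')
--             in_domain = True
--             need_sep = False
--         elif in_domain and ch == '.':
--             res.append(' dot ')
--             need_sep = False
--         else:
--             if need_sep:
--                 res.append(', ')
--             res.append(ch)
--             need_sep = True
--     return ''.join(res)
-- ===== Notes on version B (the rewrite author's own statement) =====
-- stated objective: alternative
-- what changed: Replaces lower/split('@')/nested ', '.join + ' dot '.join with a single linear state-machine pass over the characters that emits separators (', ', ', at, ', ' dot ') based on an in_domain flag and a need_sep flag.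
import Mathlib
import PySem

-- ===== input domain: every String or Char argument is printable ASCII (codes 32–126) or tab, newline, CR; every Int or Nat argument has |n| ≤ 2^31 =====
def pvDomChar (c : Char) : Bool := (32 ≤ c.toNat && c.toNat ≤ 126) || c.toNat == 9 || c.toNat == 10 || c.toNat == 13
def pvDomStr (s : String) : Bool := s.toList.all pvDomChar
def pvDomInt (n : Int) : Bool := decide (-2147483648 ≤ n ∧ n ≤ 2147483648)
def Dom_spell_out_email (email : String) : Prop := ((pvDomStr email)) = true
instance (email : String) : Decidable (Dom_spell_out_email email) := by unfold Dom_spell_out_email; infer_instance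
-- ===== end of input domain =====

-- B replaces A's lower/split('@')/nested-join structure by one linear state-machine pass; same cost, different decomposition.

-- ===== PORT A =====
-- literal port of A: lower, split on '@', comma-join username, ' dot '-join the comma-joined domain parts
def spell_out_email (email : String) : String :=
  let parts := PySem.Chars.splitOn (PySem.Chars.lower email.toList) "@".toList
  if parts.length ≠ 2 then email
  else
    let username := parts[0]!
    let domain := parts[1]!
    let username_spelled := PySem.Chars.join ", ".toList (username.map (fun c => [c]))
    let domain_parts := PySem.Chars.splitOn domain ".".toList
    let domain_spelled := PySem.Chars.join " dot ".toList
      (domain_parts.map (fun part => PySem.Chars.join ", ".toList (part.map (fun c => [c]))))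
    String.ofList (username_spelled ++ ", at, ".toList ++ domain_spelled)

-- ===== PORT B =====
-- one step of B's state machine: state = (output so far, need_sep, in_domain)
def pvSpellStep (st : List Char × Bool × Bool) (ch : Char) : List Char × Bool × Bool :=
  match st with
  | (res, needSep, inDomain) =>
    if ch = '@' then (res ++ ", at, ".toList, false, true)
    else if inDomain ∧ ch = '.' then (res ++ " dot ".toList, false, inDomain)
    else ((if needSep then res ++ ", ".toList else res) ++ [ch], true, inDomain)

def spell_out_email_alt (email : String) : String :=
  if PySem.Str.count email "@" ≠ 1 then email
  else String.ofList ((PySem.Chars.lower email.toList).foldl pvSpellStep ([], false, false)).1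

-- ===== PRECONDITION & SPEC =====
def Spec_spell_out_email (email : String) (out : String) : Prop := out = spell_out_email_alt email
instance (email : String) (out : String) : Decidable (Spec_spell_out_email email out) := by unfold Spec_spell_out_email; infer_instance

-- ===== CLAIM (what is proved, stated in full; the proofs are below) =====
def Claim_equal_spell_out_email : Prop := ∀ (email : String), Dom_spell_out_email email → Spec_spell_out_email email (spell_out_email email)

-- ===== LEMMAS AND PROOFS =====

-- structural split on a single character (proof-side model of str.split(c))
def pvSplit (c : Char) : List Char → List (List Char)
  | [] => [[]]
  | x :: t => if x = c then [] :: pvSplit c t else (pvSplit c t).modifyHead (x :: ·)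

-- spelled-out letters with a pending-separator flag ("x, y, z"; leading ", " when the flag is set)
def pvSpellU : Bool → List Char → List Char
  | _, [] => []
  | false, x :: t => x :: pvSpellU true t
  | true, x :: t => ',' :: ' ' :: x :: pvSpellU true t

-- spelled-out domain: '.' becomes " dot " and clears the separator flag
def pvSpellD : Bool → List Char → List Char
  | _, [] => []
  | n, x :: t =>
    if x = '.' then " dot ".toList ++ pvSpellD false t
    else (if n then [',', ' '] else []) ++ x :: pvSpellD true t

-- final need_sep flags of the two fold segments
def pvNeedU (n : Bool) (l : List Char) : Bool := n || !l.isEmpty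

def pvNeedD : Bool → List Char → Bool
  | n, [] => n
  | _, x :: t => pvNeedD (x ≠ '.') t

-- " dot "-join of spelled parts, with the separator flag threaded through the first part
def pvDJ (n : Bool) : List (List Char) → List Char
  | [] => []
  | [p] => pvSpellU n p
  | p :: rest => pvSpellU n p ++ " dot ".toList ++ pvDJ false rest

lemma pvSplit_ne_nil (c : Char) (l : List Char) : pvSplit c l ≠ [] := by
  induction l with
  | nil => simp [pvSplit]
  | cons x t ih =>
    simp only [pvSplit]
    split
    · simp
    · cases h : pvSplit c t with
      | nil => exact absurd h ih
      | cons p ps => simp [h]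

lemma splitOn_go_single (c : Char) (fuel : Nat) :
    ∀ (l cur : List Char) (acc : List (List Char)), l.length ≤ fuel →
      PySem.Chars.splitOn.go [c] fuel l cur acc
        = acc.reverse ++ (pvSplit c l).modifyHead (cur.reverse ++ ·) := by
  induction fuel with
  | zero =>
    intro l cur acc hl
    have : l = [] := by cases l <;> simp_all
    subst this
    simp [PySem.Chars.splitOn.go, pvSplit]
  | succ fuel ih =>
    intro l cur acc hl
    cases l with
    | nil => simp [PySem.Chars.splitOn.go, pvSplit]
    | cons x rest =>
      rw [PySem.Chars.splitOn.go]
      by_cases hx : x = c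
      · subst hx
        have hpre : List.isPrefixOf [x] (x :: rest) = true := by
          simp [List.isPrefixOf]
        simp only [hpre, if_true, List.length_cons, List.length_nil, List.drop_succ_cons, List.drop_zero]
        rw [ih rest [] (cur.reverse :: acc) (by simpa using Nat.le_of_succ_le_succ hl)]
        simp only [pvSplit, if_pos rfl, List.modifyHead_cons, List.reverse_cons,
          List.reverse_nil, List.nil_append, List.append_nil]
        cases h : pvSplit x rest with
        | nil => exact absurd h (pvSplit_ne_nil x rest)
        | cons p ps => simp [h]
      · have hpre : List.isPrefixOf [c] (x :: rest) = false := by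
          simp [List.isPrefixOf]
          exact fun h => absurd h.symm hx
        simp only [hpre, Bool.false_eq_true, if_false]
        rw [ih rest (x :: cur) acc (by simpa using Nat.le_of_succ_le_succ hl)]
        simp only [pvSplit, if_neg hx]
        cases h : pvSplit c rest with
        | nil => exact absurd h (pvSplit_ne_nil c rest)
        | cons p ps => simp [h]

lemma splitOn_single (c : Char) (l : List Char) :
    PySem.Chars.splitOn l [c] = pvSplit c l := by
  unfold PySem.Chars.splitOn
  rw [splitOn_go_single c (l.length + 1) l [] [] (Nat.le_succ _)]
  cases h : pvSplit c l with
  | nil => exact absurd h (pvSplit_ne_nil c l)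
  | cons p ps => simp [h]

lemma pvSplit_length (c : Char) (l : List Char) :
    (pvSplit c l).length = l.count c + 1 := by
  induction l with
  | nil => simp [pvSplit]
  | cons x t ih =>
    simp only [pvSplit]
    by_cases hx : x = c
    · subst hx; simp [List.count_cons, ih]
    · simp [hx, List.count_cons, Ne.symm hx, ih, List.length_modifyHead]

lemma pvSplit_eq_single (c : Char) : ∀ (l d : List Char),
    pvSplit c l = [d] → l = d ∧ c ∉ d := by
  intro l
  induction l with
  | nil =>
    intro d h
    have hd : d = [] := by simpa [pvSplit, eq_comm] using h
    subst hd; simp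
  | cons x t ih =>
    intro d h
    simp only [pvSplit] at h
    by_cases hx : x = c
    · rw [if_pos hx] at h
      obtain ⟨h1, h2⟩ := List.cons.injEq _ _ _ _ ▸ h
      exact absurd h2 (pvSplit_ne_nil c t)
    · rw [if_neg hx] at h
      cases hp : pvSplit c t with
      | nil => exact absurd hp (pvSplit_ne_nil c t)
      | cons p ps =>
        rw [hp] at h
        simp only [List.modifyHead_cons] at h
        obtain ⟨h1, h2⟩ := List.cons.injEq _ _ _ _ ▸ h
        subst h2
        obtain ⟨ht, hc⟩ := ih p hp
        subst ht h1
        exact ⟨rfl, by simp [hc, Ne.symm, hx]⟩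

lemma pvSplit_eq_pair (c : Char) : ∀ (l u d : List Char),
    pvSplit c l = [u, d] → l = u ++ c :: d ∧ c ∉ u ∧ c ∉ d := by
  intro l
  induction l with
  | nil => intro u d h; simp [pvSplit] at h
  | cons x t ih =>
    intro u d h
    simp only [pvSplit] at h
    by_cases hx : x = c
    · rw [if_pos hx] at h
      obtain ⟨h1, h2⟩ := List.cons.injEq _ _ _ _ ▸ h
      obtain ⟨ht, hc⟩ := pvSplit_eq_single c t d h2
      subst hx ht h1
      simp [hc]
    · rw [if_neg hx] at h
      cases hp : pvSplit c t with
      | nil => exact absurd hp (pvSplit_ne_nil c t)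
      | cons p ps =>
        rw [hp] at h
        simp only [List.modifyHead_cons] at h
        obtain ⟨h1, h2⟩ := List.cons.injEq _ _ _ _ ▸ h
        subst h1
        obtain ⟨ht, hcu, hcd⟩ := ih p d (by rw [hp, h2])
        subst ht
        exact ⟨rfl, by simp [hcu, Ne.symm, hx], hcd⟩

lemma count_go_single (c : Char) (fuel : Nat) :
    ∀ (l : List Char) (acc : Nat), l.length ≤ fuel →
      PySem.Chars.count.go [c] fuel l acc = acc + l.count c := by
  induction fuel with
  | zero =>
    intro l acc hl
    have : l = [] := by cases l <;> simp_all
    subst this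
    simp [PySem.Chars.count.go]
  | succ fuel ih =>
    intro l acc hl
    cases l with
    | nil => simp [PySem.Chars.count.go]
    | cons x rest =>
      rw [PySem.Chars.count.go]
      by_cases hx : x = c
      · subst hx
        have hpre : List.isPrefixOf [x] (x :: rest) = true := by simp [List.isPrefixOf]
        simp only [hpre, if_true, List.length_cons, List.length_nil, List.drop_succ_cons, List.drop_zero]
        rw [ih rest (acc + 1) (by simpa using Nat.le_of_succ_le_succ hl)]
        simp [List.count_cons]
        omega
      · have hpre : List.isPrefixOf [c] (x :: rest) = false := by
          simp [List.isPrefixOf]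
          exact fun h => absurd h.symm hx
        simp only [hpre, Bool.false_eq_true, if_false]
        rw [ih rest acc (by simpa using Nat.le_of_succ_le_succ hl)]
        simp [List.count_cons, hx]

lemma count_single (c : Char) (l : List Char) :
    PySem.Chars.count l [c] = l.count c := by
  unfold PySem.Chars.count
  simp only [List.isEmpty_cons, Bool.false_eq_true, if_false]
  rw [count_go_single c l.length l 0 le_rfl]
  omega

lemma lowerChar_beq_at (x : Char) : (PySem.Chars.lowerChar x == '@') = (x == '@') := by
  unfold PySem.Chars.lowerChar PySem.Chars.isupper
  by_cases h : ('A' ≤ x ∧ x ≤ 'Z')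
  · have hA : ('A' : Char).val.toNat = 65 := by decide
    have h65 : 65 ≤ x.val.toNat := by
      have h1 := UInt32.le_iff_toNat_le.mp (Char.le_def.mp h.1)
      rw [hA] at h1; exact h1
    have h90 : x.val.toNat ≤ 90 := by
      have h1 := UInt32.le_iff_toNat_le.mp (Char.le_def.mp h.2)
      have hZ : ('Z' : Char).val.toNat = 90 := by decide
      rw [hZ] at h1; exact h1
    have hxt : x.toNat = x.val.toNat := rfl
    have hval : (x.toNat + 32).isValidChar := by
      left; rw [hxt]; omega
    have htn : (Char.ofNat (x.toNat + 32)).toNat = x.toNat + 32 := by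
      rw [Char.ofNat, dif_pos hval]
      exact UInt32.toNat_ofNatLT
    have hne1 : (Char.ofNat (x.toNat + 32) == '@') = false := by
      apply beq_eq_false_iff_ne.mpr
      intro he
      have h2 : (Char.ofNat (x.toNat + 32)).toNat = ('@' : Char).toNat := by rw [he]
      rw [htn] at h2
      have h3 : ('@' : Char).toNat = 64 := by decide
      rw [h3, hxt] at h2
      omega
    have hne2 : (x == '@') = false := by
      apply beq_eq_false_iff_ne.mpr
      intro he
      rw [he] at h65
      have : ('@' : Char).val.toNat = 64 := by decide
      omega
    have hcond : (decide ('A' ≤ x) && decide (x ≤ 'Z')) = true := by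
      simp [h.1, h.2]
    rw [if_pos hcond, hne1, hne2]
  · have hb : (decide ('A' ≤ x) && decide (x ≤ 'Z')) = false := by
      simp only [Bool.and_eq_false_iff, decide_eq_false_iff_not]
      by_cases h1 : 'A' ≤ x
      · right; intro h2; exact h ⟨h1, h2⟩
      · left; exact h1
    rw [if_neg (by simp [hb])]

lemma count_lower_at (l : List Char) :
    (PySem.Chars.lower l).count '@' = l.count '@' := by
  simp only [PySem.Chars.lower, List.count_eq_countP, List.countP_map]
  apply List.countP_congr
  intro x _
  rw [Function.comp_apply, lowerChar_beq_at]

-- comma-join of singletons is pvSpellU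
lemma cj_cons (t : List Char) : ∀ x : Char,
    PySem.Chars.join ", ".toList ([x] :: t.map (fun c => [c])) = x :: pvSpellU true t := by
  induction t with
  | nil => intro x; simp [PySem.Chars.join_singleton, pvSpellU]
  | cons y r ih =>
    intro x
    simp only [List.map_cons]
    rw [PySem.Chars.join_cons_cons, ih y]
    have hsep : (", ".toList : List Char) = [',', ' '] := by decide
    rw [hsep]
    rfl

lemma cj_eq (u : List Char) :
    PySem.Chars.join ", ".toList (u.map (fun c => [c])) = pvSpellU false u := by
  cases u with
  | nil => simp [PySem.Chars.join_nil, pvSpellU]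
  | cons x t => simp only [List.map_cons]; rw [cj_cons t x]; rfl

lemma dj_eq : ∀ (parts : List (List Char)), parts ≠ [] →
    PySem.Chars.join " dot ".toList (parts.map (fun p => PySem.Chars.join ", ".toList (p.map (fun c => [c]))))
      = pvDJ false parts := by
  intro parts
  induction parts with
  | nil => intro h; exact absurd rfl h
  | cons p rest ih =>
    intro _
    cases rest with
    | nil =>
      simp only [List.map_cons, List.map_nil, PySem.Chars.join_singleton]
      rw [cj_eq]
      rfl
    | cons q qs =>
      simp only [List.map_cons]
      rw [PySem.Chars.join_cons_cons]
      have hrest := ih (by simp)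
      simp only [List.map_cons] at hrest
      rw [hrest, cj_eq]
      show _ = pvSpellU false p ++ " dot ".toList ++ pvDJ false (q :: qs)
      simp [List.append_assoc]

lemma pvDJ_cons (n : Bool) (x : Char) (p : List Char) (ps : List (List Char)) :
    pvDJ n ((x :: p) :: ps) = (if n then [',', ' '] else []) ++ x :: pvDJ true (p :: ps) := by
  cases ps with
  | nil =>
    cases n <;> simp [pvDJ, pvSpellU]
  | cons q qs =>
    cases n <;> simp [pvDJ, pvSpellU]

lemma pvDJ_split (d : List Char) : ∀ n, pvDJ n (pvSplit '.' d) = pvSpellD n d := by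
  induction d with
  | nil => intro n; simp [pvSplit, pvDJ, pvSpellU, pvSpellD]
  | cons x t ih =>
    intro n
    simp only [pvSplit]
    by_cases hx : x = '.'
    · subst hx
      rw [if_pos rfl]
      cases hp : pvSplit '.' t with
      | nil => exact absurd hp (pvSplit_ne_nil '.' t)
      | cons p ps =>
        have hIH := ih false
        rw [hp] at hIH
        simp only [pvDJ, pvSpellU, pvSpellD, if_pos rfl]
        cases n <;> simp [pvDJ, pvSpellU, hIH]
    · rw [if_neg hx]
      cases hp : pvSplit '.' t with
      | nil => exact absurd hp (pvSplit_ne_nil '.' t)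
      | cons p ps =>
        have hIH := ih true
        rw [hp] at hIH
        simp only [List.modifyHead_cons]
        rw [pvDJ_cons n x p ps, hIH]
        simp only [pvSpellD, if_neg hx]

lemma foldl_username (u : List Char) : ∀ (res : List Char) (need : Bool), '@' ∉ u →
    u.foldl pvSpellStep (res, need, false) = (res ++ pvSpellU need u, pvNeedU need u, false) := by
  induction u with
  | nil => intro res need _; simp [pvSpellU, pvNeedU]
  | cons x t ih =>
    intro res need hmem
    have hx : ¬ (x = '@') := fun h => hmem (by simp [h])
    have step : pvSpellStep (res, need, false) x
        = ((if need then res ++ ", ".toList else res) ++ [x], true, false) := by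
      simp [pvSpellStep, hx]
    simp only [List.foldl_cons, step]
    rw [ih _ true (fun h => hmem (List.mem_cons_of_mem _ h))]
    cases need <;> simp [pvSpellU, pvNeedU]

lemma foldl_domain (d : List Char) : ∀ (res : List Char) (need : Bool), '@' ∉ d →
    d.foldl pvSpellStep (res, need, true) = (res ++ pvSpellD need d, pvNeedD need d, true) := by
  induction d with
  | nil => intro res need _; simp [pvSpellD, pvNeedD]
  | cons x t ih =>
    intro res need hmem
    have hx : ¬ (x = '@') := fun h => hmem (by simp [h])
    have htail : '@' ∉ t := fun h => hmem (List.mem_cons_of_mem _ h)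
    by_cases hdot : x = '.'
    · subst hdot
      have step : pvSpellStep (res, need, true) '.'
          = (res ++ " dot ".toList, false, true) := by
        simp [pvSpellStep]
      simp only [List.foldl_cons, step]
      rw [ih _ false htail]
      simp [pvSpellD, pvNeedD]
    · have step : pvSpellStep (res, need, true) x
          = ((if need then res ++ ", ".toList else res) ++ [x], true, true) := by
        simp [pvSpellStep, hx, hdot]
      simp only [List.foldl_cons, step]
      rw [ih _ true htail]
      cases need <;> simp [pvSpellD, pvNeedD, hdot, hx]

-- ===== VERDICT (by name: the statement is the Claim_ definition above) =====
theorem spell_out_email_spec : Claim_equal_spell_out_email := by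
  intro email _
  have hat : ("@".toList : List Char) = ['@'] := by decide
  have hdot : (".".toList : List Char) = ['.'] := by decide
  have hcnt : PySem.Str.count email "@" = email.toList.count '@' := by
    rw [PySem.Str.count_eq, hat]
    exact count_single '@' email.toList
  simp only [Spec_spell_out_email, spell_out_email, spell_out_email_alt]
  rw [hat, hdot, splitOn_single, pvSplit_length, count_lower_at, hcnt]
  by_cases h1 : email.toList.count '@' = 1
  · rw [if_neg (by omega), if_neg (by omega)]
    -- the split has exactly two parts: lower email = u ++ '@' :: d
    have hlen : (pvSplit '@' (PySem.Chars.lower email.toList)).length = 2 := by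
      rw [pvSplit_length, count_lower_at, h1]
    obtain ⟨u, d, hud⟩ : ∃ u d, pvSplit '@' (PySem.Chars.lower email.toList) = [u, d] := by
      cases hp : pvSplit '@' (PySem.Chars.lower email.toList) with
      | nil => exact absurd hp (pvSplit_ne_nil _ _)
      | cons p ps =>
        cases ps with
        | nil => rw [hp] at hlen; simp at hlen
        | cons q qs =>
          cases qs with
          | nil => exact ⟨p, q, rfl⟩
          | cons r rs => rw [hp] at hlen; simp at hlen
    obtain ⟨hdecomp, hu, hd⟩ := pvSplit_eq_pair '@' _ u d hud
    rw [hud]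
    simp only [List.getElem!_cons_zero, List.getElem!_cons_succ]
    rw [hdecomp, List.foldl_append, List.foldl_cons]
    rw [foldl_username u [] false hu]
    have stepAt : pvSpellStep (([] : List Char) ++ pvSpellU false u, pvNeedU false u, false) '@'
        = (([] : List Char) ++ pvSpellU false u ++ ", at, ".toList, false, true) := by
      simp [pvSpellStep]
    rw [stepAt, foldl_domain d _ false hd]
    rw [splitOn_single, dj_eq _ (pvSplit_ne_nil '.' d), pvDJ_split d false, cj_eq]
    apply congrArg String.ofList
    simp
  · rw [if_pos (by omega), if_pos (by omega)]
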